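-- pv_equiv track=rewrite | github.com/AngJianHwee/LeetCode | CodeForces/Codeforces Round #565 (Div. 3) - A. Divide it!.py | count
-- ===== SOURCE A (Python) =====
-- def count(n):
-- 	if n == 1:
-- 		return 0
-- 	for i in (2,3,5):
-- 		if n%i == 0:
-- 			x = count((i-1)*n//i)
-- 			if x == -1:
-- 				return -1
-- 			else:
-- 				return x + 1
-- 	return -1
-- ===== SOURCE B (Python) =====
-- def count(n):
--     def strip(n, p):
--         k = 0
--         while n % p == 0:
--             n //= p
--             k += 1
--         return k, n
--
--     a, n = strip(n, 2)
--     b, n = strip(n, 3)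
--     c, n = strip(n, 5)
--     return a + 2 * b + 3 * c if n == 1 else -1
-- ===== Notes on version B (the rewrite author's own statement) =====
-- stated objective: simpler
-- what changed: Replaces the interleaved greedy recursion (which peels one prime factor per call) with three independent factor-extraction while-loops and a weighted closed-form count of the extracted exponents, returning the failure sentinel when a nontrivial residue remains.
-- outside the precondition, e.g. on count(0): A raises RecursionError, B does not finish within the time limit
import Mathlib
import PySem

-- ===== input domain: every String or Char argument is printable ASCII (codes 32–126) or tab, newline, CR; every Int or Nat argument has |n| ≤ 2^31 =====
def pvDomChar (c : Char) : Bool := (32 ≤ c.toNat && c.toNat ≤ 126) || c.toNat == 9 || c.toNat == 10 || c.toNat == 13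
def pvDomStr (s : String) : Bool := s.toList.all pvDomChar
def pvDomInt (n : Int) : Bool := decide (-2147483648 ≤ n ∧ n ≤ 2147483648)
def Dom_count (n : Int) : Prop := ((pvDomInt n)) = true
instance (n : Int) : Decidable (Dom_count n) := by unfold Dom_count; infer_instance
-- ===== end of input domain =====

-- B replaces A's interleaved greedy recursion by three factor-extraction loops and the
-- closed form a + 2*b + 3*c; return value only, no side effects.

-- termination helper for the ports (cited by the decreasing_by clauses)
theorem pvStepLt (n i : Int) (hn : n ≠ 0) (hi : 2 ≤ i) (hd : i ∣ n) :
    (PySem.Int.floordiv ((i - 1) * n) i).natAbs < n.natAbs := by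
  obtain ⟨k, rfl⟩ := hd
  have hk : k ≠ 0 := by rintro rfl; simp at hn
  have hi0 : i ≠ 0 := by omega
  have : (i - 1) * (i * k) = i * ((i - 1) * k) := by ring
  rw [this, PySem.Int.floordiv_eq_ediv_of_pos (by omega), Int.mul_ediv_cancel_left _ hi0]
  have h1 : ((i - 1) * k).natAbs = (i - 1).natAbs * k.natAbs := Int.natAbs_mul _ _
  have h2 : (i * k).natAbs = i.natAbs * k.natAbs := Int.natAbs_mul _ _
  have h3 : (i - 1).natAbs < i.natAbs := by omega
  have h4 : 0 < k.natAbs := by omega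
  rw [h1, h2]; exact Nat.mul_lt_mul_of_lt_of_le h3 (Nat.le_refl _) h4

theorem pvDivLt (n p : Int) (hn : n ≠ 0) (hp : 2 ≤ p) (hd : p ∣ n) :
    (PySem.Int.floordiv n p).natAbs < n.natAbs := by
  obtain ⟨k, rfl⟩ := hd
  have hk : k ≠ 0 := by rintro rfl; simp at hn
  rw [PySem.Int.floordiv_eq_ediv_of_pos (by omega), Int.mul_ediv_cancel_left _ (by omega : p ≠ 0)]
  have h2 : (p * k).natAbs = p.natAbs * k.natAbs := Int.natAbs_mul _ _
  have : 1 * k.natAbs < p.natAbs * k.natAbs :=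
    Nat.mul_lt_mul_of_lt_of_le (by omega) (Nat.le_refl _) (by omega)
  omega

-- ===== PORT A =====
def count (n : Int) : Int :=
  if _h0 : n = 0 then 0  -- totality guard: Python recurses forever here (RecursionError); outside Pre_
  else if n = 1 then 0
  else if h2 : PySem.Int.mod n 2 = 0 then
    let x := count (PySem.Int.floordiv ((2 - 1) * n) 2)
    if x = -1 then -1 else x + 1
  else if h3 : PySem.Int.mod n 3 = 0 then
    let x := count (PySem.Int.floordiv ((3 - 1) * n) 3)
    if x = -1 then -1 else x + 1
  else if h5 : PySem.Int.mod n 5 = 0 then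
    let x := count (PySem.Int.floordiv ((5 - 1) * n) 5)
    if x = -1 then -1 else x + 1
  else -1
termination_by n.natAbs
decreasing_by
  · exact pvStepLt n 2 _h0 (by norm_num) ((PySem.Int.mod_eq_zero_iff_dvd n 2).mp h2)
  · exact pvStepLt n 3 _h0 (by norm_num) ((PySem.Int.mod_eq_zero_iff_dvd n 3).mp h3)
  · exact pvStepLt n 5 _h0 (by norm_num) ((PySem.Int.mod_eq_zero_iff_dvd n 5).mp h5)

-- ===== PORT B =====
-- 'while n % p == 0: n //= p; k += 1' — returns (k, remaining n)
def strip (n p : Int) (hp : 2 ≤ p) : Int × Int :=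
  if _h0 : n = 0 then (0, 0)  -- totality guard: the Python loop never exits at 0; outside Pre_
  else if hm : PySem.Int.mod n p = 0 then
    let r := strip (PySem.Int.floordiv n p) p hp
    (r.1 + 1, r.2)
  else (0, n)
termination_by n.natAbs
decreasing_by
  exact pvDivLt n p _h0 hp ((PySem.Int.mod_eq_zero_iff_dvd n p).mp hm)

def count_alt (n : Int) : Int :=
  let r2 := strip n 2 (by norm_num)
  let r3 := strip r2.2 3 (by norm_num)
  let r5 := strip r3.2 5 (by norm_num)
  if r5.2 = 1 then r2.1 + 2 * r3.1 + 3 * r5.1 else -1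

-- ===== PRECONDITION & SPEC =====
-- Pre_ excludes only n = 0, where Python A hits RecursionError (and B's loop diverges).
def Pre_count (n : Int) : Prop := n ≠ 0
instance (n : Int) : Decidable (Pre_count n) := by unfold Pre_count; infer_instance
def pvWitness_count : Int := 30

def Spec_count (n : Int) (out : Int) : Prop := out = count_alt n
instance (n : Int) (out : Int) : Decidable (Spec_count n out) := by unfold Spec_count; infer_instance

-- ===== CLAIM (what is proved, stated in full; the proofs are below) =====
def Claim_equal_count : Prop := ∀ (n : Int), Dom_count n → Pre_count n → Spec_count n (count n)

-- ===== LEMMAS AND PROOFS =====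

theorem strip_not_div (n p : Int) (hp : 2 ≤ p) (h : PySem.Int.mod n p ≠ 0) :
    strip n p hp = (0, n) := by
  have h0 : n ≠ 0 := by
    rintro rfl
    exact h ((PySem.Int.mod_eq_zero_iff_dvd 0 p).mpr (dvd_zero p))
  rw [strip]; simp [h0, h]

theorem strip_div (n p : Int) (hp : 2 ≤ p) (h0 : n ≠ 0) (h : PySem.Int.mod n p = 0) :
    strip n p hp = ((strip (PySem.Int.floordiv n p) p hp).1 + 1,
                    (strip (PySem.Int.floordiv n p) p hp).2) := by
  rw [strip]; simp [h0, h]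

theorem strip_fst_nonneg_aux : ∀ (N : Nat) (n p : Int) (hp : 2 ≤ p), n.natAbs ≤ N →
    0 ≤ (strip n p hp).1 := by
  intro N
  induction N with
  | zero =>
    intro n p hp h
    have h0 : n = 0 := by omega
    rw [strip]; simp [h0]
  | succ N ih =>
    intro n p hp h
    by_cases h0 : n = 0
    · rw [strip]; simp [h0]
    by_cases hm : PySem.Int.mod n p = 0
    · rw [strip_div n p hp h0 hm]
      have hlt := pvDivLt n p h0 hp ((PySem.Int.mod_eq_zero_iff_dvd n p).mp hm)
      have := ih (PySem.Int.floordiv n p) p hp (by omega)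
      simp only
      omega
    · rw [strip_not_div n p hp hm]

theorem strip_fst_nonneg (n p : Int) (hp : 2 ≤ p) : 0 ≤ (strip n p hp).1 :=
  strip_fst_nonneg_aux n.natAbs n p hp (Nat.le_refl _)

-- closed form of A's recursion argument when i divides n
theorem pvArgEq (n i : Int) (hi : 0 < i) (hd : i ∣ n) :
    PySem.Int.floordiv ((i - 1) * n) i = (i - 1) * PySem.Int.floordiv n i := by
  obtain ⟨k, rfl⟩ := hd
  have hi0 : i ≠ 0 := by omega
  have h1 : (i - 1) * (i * k) = i * ((i - 1) * k) := by ring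
  rw [h1, PySem.Int.floordiv_eq_ediv_of_pos hi, PySem.Int.floordiv_eq_ediv_of_pos hi,
    Int.mul_ediv_cancel_left _ hi0, Int.mul_ediv_cancel_left _ hi0]

-- mod facts used to push parity/divisibility through the factorisations
theorem mod_ne_of_not_dvd (n p : Int) (h : ¬ p ∣ n) : PySem.Int.mod n p ≠ 0 := fun hm =>
  h ((PySem.Int.mod_eq_zero_iff_dvd n p).mp hm)

theorem dvd_of_mod_eq (n p : Int) (h : PySem.Int.mod n p = 0) : p ∣ n :=
  (PySem.Int.mod_eq_zero_iff_dvd n p).mp h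

-- B satisfies A's recurrence at an even n
theorem alt_rec_two (n : Int) (h0 : n ≠ 0) (h2 : PySem.Int.mod n 2 = 0) :
    count_alt n = (if count_alt (PySem.Int.floordiv n 2) = -1 then -1
                   else count_alt (PySem.Int.floordiv n 2) + 1) := by
  unfold count_alt
  have e1 := strip_div n 2 (by norm_num : (2:Int) ≤ 2) h0 h2
  set m := PySem.Int.floordiv n 2 with hm
  have ha := strip_fst_nonneg m 2 (by norm_num)
  have hb := strip_fst_nonneg (strip m 2 (by norm_num)).2 3 (by norm_num)
  have hc := strip_fst_nonneg (strip (strip m 2 (by norm_num)).2 3 (by norm_num)).2 5 (by norm_num)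
  simp only [e1]
  split_ifs with hs <;> simp_all <;> omega

-- B satisfies A's recurrence at an odd multiple of 3 (A recurses on 2*(n//3))
theorem alt_rec_three (n : Int) (h0 : n ≠ 0) (h2 : PySem.Int.mod n 2 ≠ 0)
    (h3 : PySem.Int.mod n 3 = 0) :
    count_alt n = (if count_alt (2 * PySem.Int.floordiv n 3) = -1 then -1
                   else count_alt (2 * PySem.Int.floordiv n 3) + 1) := by
  obtain ⟨m, hnm⟩ := dvd_of_mod_eq n 3 h3
  have hmv : PySem.Int.floordiv n 3 = m := by
    rw [hnm, PySem.Int.floordiv_eq_ediv_of_pos (by norm_num),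
      Int.mul_ediv_cancel_left _ (by norm_num)]
  have hm0 : m ≠ 0 := by rintro rfl; simp at hnm; exact h0 hnm
  have hmodd : PySem.Int.mod m 2 ≠ 0 := by
    refine mod_ne_of_not_dvd m 2 (fun ⟨j, hj⟩ => h2 ?_)
    exact (PySem.Int.mod_eq_zero_iff_dvd n 2).mpr ⟨3 * j, by rw [hnm, hj]; ring⟩
  have h2m0 : (2 * m : Int) ≠ 0 := by simp [hm0]
  have h2m2 : PySem.Int.mod (2 * m) 2 = 0 :=
    (PySem.Int.mod_eq_zero_iff_dvd _ 2).mpr ⟨m, rfl⟩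
  have hdiv2m : PySem.Int.floordiv (2 * m) 2 = m := by
    rw [PySem.Int.floordiv_eq_ediv_of_pos (by norm_num),
      Int.mul_ediv_cancel_left _ (by norm_num)]
  rw [hmv]
  unfold count_alt
  have e1 := strip_not_div n 2 (by norm_num : (2:Int) ≤ 2) h2
  have e2 := strip_div (2 * m) 2 (by norm_num : (2:Int) ≤ 2) h2m0 h2m2
  rw [hdiv2m] at e2
  have e3 := strip_not_div m 2 (by norm_num : (2:Int) ≤ 2) hmodd
  rw [e3] at e2
  have e4 := strip_div n 3 (by norm_num : (2:Int) ≤ 3) h0 h3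
  rw [hmv] at e4
  have hb := strip_fst_nonneg m 3 (by norm_num)
  have hc := strip_fst_nonneg (strip m 3 (by norm_num)).2 5 (by norm_num)
  simp only [e1, e2, e4]
  split_ifs with hs <;> simp_all <;> omega

-- B satisfies A's recurrence at a multiple of 5 coprime to 6 (A recurses on 4*(n//5))
theorem alt_rec_five (n : Int) (h0 : n ≠ 0) (h2 : PySem.Int.mod n 2 ≠ 0)
    (h3 : PySem.Int.mod n 3 ≠ 0) (h5 : PySem.Int.mod n 5 = 0) :
    count_alt n = (if count_alt (4 * PySem.Int.floordiv n 5) = -1 then -1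
                   else count_alt (4 * PySem.Int.floordiv n 5) + 1) := by
  obtain ⟨m, hnm⟩ := dvd_of_mod_eq n 5 h5
  have hmv : PySem.Int.floordiv n 5 = m := by
    rw [hnm, PySem.Int.floordiv_eq_ediv_of_pos (by norm_num),
      Int.mul_ediv_cancel_left _ (by norm_num)]
  have hm0 : m ≠ 0 := by rintro rfl; simp at hnm; exact h0 hnm
  have hmodd : PySem.Int.mod m 2 ≠ 0 := by
    refine mod_ne_of_not_dvd m 2 (fun ⟨j, hj⟩ => h2 ?_)
    exact (PySem.Int.mod_eq_zero_iff_dvd n 2).mpr ⟨5 * j, by rw [hnm, hj]; ring⟩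
  have hm3 : PySem.Int.mod m 3 ≠ 0 := by
    refine mod_ne_of_not_dvd m 3 (fun ⟨j, hj⟩ => h3 ?_)
    exact (PySem.Int.mod_eq_zero_iff_dvd n 3).mpr ⟨5 * j, by rw [hnm, hj]; ring⟩
  have h4m0 : (4 * m : Int) ≠ 0 := by simp [hm0]
  have h2m0 : (2 * m : Int) ≠ 0 := by simp [hm0]
  have h4m2 : PySem.Int.mod (4 * m) 2 = 0 :=
    (PySem.Int.mod_eq_zero_iff_dvd _ 2).mpr ⟨2 * m, by ring⟩
  have h2m2 : PySem.Int.mod (2 * m) 2 = 0 :=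
    (PySem.Int.mod_eq_zero_iff_dvd _ 2).mpr ⟨m, rfl⟩
  have hdiv4m : PySem.Int.floordiv (4 * m) 2 = 2 * m := by
    rw [show (4 * m : Int) = 2 * (2 * m) by ring,
      PySem.Int.floordiv_eq_ediv_of_pos (by norm_num),
      Int.mul_ediv_cancel_left _ (by norm_num)]
  have hdiv2m : PySem.Int.floordiv (2 * m) 2 = m := by
    rw [PySem.Int.floordiv_eq_ediv_of_pos (by norm_num),
      Int.mul_ediv_cancel_left _ (by norm_num)]
  rw [hmv]
  unfold count_alt
  have e1 := strip_not_div n 2 (by norm_num : (2:Int) ≤ 2) h2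
  have e1b := strip_not_div n 3 (by norm_num : (2:Int) ≤ 3) h3
  have e2 := strip_div (4 * m) 2 (by norm_num : (2:Int) ≤ 2) h4m0 h4m2
  rw [hdiv4m] at e2
  have e3 := strip_div (2 * m) 2 (by norm_num : (2:Int) ≤ 2) h2m0 h2m2
  rw [hdiv2m, strip_not_div m 2 (by norm_num) hmodd] at e3
  rw [e3] at e2
  have e4 := strip_not_div m 3 (by norm_num : (2:Int) ≤ 3) hm3
  have e5 := strip_div n 5 (by norm_num : (2:Int) ≤ 5) h0 h5
  rw [hmv] at e5
  have hc := strip_fst_nonneg m 5 (by norm_num)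
  simp only [e1, e1b, e2, e4, e5]
  split_ifs with hs <;> simp_all <;> omega

theorem alt_one : count_alt 1 = 0 := by
  unfold count_alt
  simp only [strip_not_div 1 2 (by norm_num) (by decide), strip_not_div 1 3 (by norm_num) (by decide),
    strip_not_div 1 5 (by norm_num) (by decide)]
  norm_num

theorem alt_stuck (n : Int) (h1 : n ≠ 1) (h2 : PySem.Int.mod n 2 ≠ 0)
    (h3 : PySem.Int.mod n 3 ≠ 0) (h5 : PySem.Int.mod n 5 ≠ 0) : count_alt n = -1 := by
  unfold count_alt
  simp only [strip_not_div n 2 (by norm_num) h2, strip_not_div n 3 (by norm_num) h3,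
    strip_not_div n 5 (by norm_num) h5]
  simp [h1]

theorem count_eq_alt : ∀ (N : Nat) (n : Int), n.natAbs ≤ N → n ≠ 0 → count n = count_alt n := by
  intro N
  induction N with
  | zero => intro n h h0; omega
  | succ N ih =>
    intro n h h0
    rw [count]
    by_cases h1 : n = 1
    · subst h1; simp [alt_one]
    by_cases h2 : PySem.Int.mod n 2 = 0
    · have hd := dvd_of_mod_eq n 2 h2
      have harg := pvArgEq n 2 (by norm_num) hd
      have hlt := pvStepLt n 2 h0 (by norm_num) hd
      have hm0 : PySem.Int.floordiv ((2 - 1) * n) 2 ≠ 0 := by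
        rw [harg]
        obtain ⟨k, rfl⟩ := hd
        have hk0 : k ≠ 0 := by rintro rfl; simp at h0
        have hv : PySem.Int.floordiv (2 * k) 2 = k := by
          rw [PySem.Int.floordiv_eq_ediv_of_pos (by norm_num),
            Int.mul_ediv_cancel_left _ (by norm_num)]
        rw [hv]
        exact mul_ne_zero (by norm_num) hk0
      rw [ih _ (by omega) hm0]
      simp only [h0, h1, h2, dif_pos]
      rw [alt_rec_two n h0 h2]
      have : PySem.Int.floordiv ((2 - 1) * n) 2 = PySem.Int.floordiv n 2 := by
        rw [harg]; ring_nf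
      rw [this]
      simp
    by_cases h3 : PySem.Int.mod n 3 = 0
    · have hd := dvd_of_mod_eq n 3 h3
      have harg := pvArgEq n 3 (by norm_num) hd
      have hlt := pvStepLt n 3 h0 (by norm_num) hd
      have hm0 : PySem.Int.floordiv ((3 - 1) * n) 3 ≠ 0 := by
        rw [harg]
        obtain ⟨k, rfl⟩ := hd
        have hk0 : k ≠ 0 := by rintro rfl; simp at h0
        have hv : PySem.Int.floordiv (3 * k) 3 = k := by
          rw [PySem.Int.floordiv_eq_ediv_of_pos (by norm_num),
            Int.mul_ediv_cancel_left _ (by norm_num)]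
        rw [hv]
        exact mul_ne_zero (by norm_num) hk0
      rw [ih _ (by omega) hm0]
      simp only [h0, h1, h2, h3, dif_pos]
      rw [alt_rec_three n h0 h2 h3]
      have : PySem.Int.floordiv ((3 - 1) * n) 3 = 2 * PySem.Int.floordiv n 3 := by
        rw [harg]; ring_nf
      rw [this]
      simp
    by_cases h5 : PySem.Int.mod n 5 = 0
    · have hd := dvd_of_mod_eq n 5 h5
      have harg := pvArgEq n 5 (by norm_num) hd
      have hlt := pvStepLt n 5 h0 (by norm_num) hd
      have hm0 : PySem.Int.floordiv ((5 - 1) * n) 5 ≠ 0 := by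
        rw [harg]
        obtain ⟨k, rfl⟩ := hd
        have hk0 : k ≠ 0 := by rintro rfl; simp at h0
        have hv : PySem.Int.floordiv (5 * k) 5 = k := by
          rw [PySem.Int.floordiv_eq_ediv_of_pos (by norm_num),
            Int.mul_ediv_cancel_left _ (by norm_num)]
        rw [hv]
        exact mul_ne_zero (by norm_num) hk0
      rw [ih _ (by omega) hm0]
      simp only [h0, h1, h2, h3, h5, dif_pos]
      rw [alt_rec_five n h0 h2 h3 h5]
      have : PySem.Int.floordiv ((5 - 1) * n) 5 = 4 * PySem.Int.floordiv n 5 := by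
        rw [harg]; ring_nf
      rw [this]
      simp
    · rw [alt_stuck n h1 h2 h3 h5]
      have d2 : ¬(2 ∣ n) := fun hd => h2 ((PySem.Int.mod_eq_zero_iff_dvd n 2).mpr hd)
      have d3 : ¬(3 ∣ n) := fun hd => h3 ((PySem.Int.mod_eq_zero_iff_dvd n 3).mpr hd)
      have d5 : ¬(5 ∣ n) := fun hd => h5 ((PySem.Int.mod_eq_zero_iff_dvd n 5).mpr hd)
      simp [d2, d3, d5, h0, h1]

-- ===== VERDICT (by name: the statement is the Claim_ definition above) =====
theorem count_spec : Claim_equal_count := by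
  intro n _ hpre
  unfold Spec_count
  exact count_eq_alt n.natAbs n (Nat.le_refl _) hpre
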